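-- pv_equiv track=rewrite | github.com/uqwhua/TEA | time_graph.py | _build_dict_by_list
-- ===== SOURCE A (Python) =====
-- def _build_dict_by_list(elements, start_idx):
--     dic = {}
--     idx = start_idx
--     for ele in elements:
--         tup = tuple(ele)
--         # assert tup not in dic
--         # duplicate after padding
--         if tup not in dic:
--             dic[tup] = idx
--             idx += 1
--     return dic
-- ===== SOURCE B (Python) =====
-- def _build_dict_by_list(elements, start_idx):
--     # worklist algorithm: repeatedly take the first remaining tuple, assign it
--     # the next index, and filter all its later duplicates out of the worklist
--     dic = {}
--     rest = [tuple(e) for e in elements]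
--     while rest:
--         head = rest[0]
--         dic[head] = start_idx + len(dic)
--         rest = [t for t in rest[1:] if t != head]
--     return dic
-- ===== Notes on version B (the rewrite author's own statement) =====
-- stated objective: alternative
-- what changed: Replaced the single seen-dict scan with a threaded counter by a worklist algorithm: repeatedly pop the first remaining tuple, index it by the current dict size, and filter all its duplicates out of the remaining list (no membership test, no counter variable).
import Mathlib
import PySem

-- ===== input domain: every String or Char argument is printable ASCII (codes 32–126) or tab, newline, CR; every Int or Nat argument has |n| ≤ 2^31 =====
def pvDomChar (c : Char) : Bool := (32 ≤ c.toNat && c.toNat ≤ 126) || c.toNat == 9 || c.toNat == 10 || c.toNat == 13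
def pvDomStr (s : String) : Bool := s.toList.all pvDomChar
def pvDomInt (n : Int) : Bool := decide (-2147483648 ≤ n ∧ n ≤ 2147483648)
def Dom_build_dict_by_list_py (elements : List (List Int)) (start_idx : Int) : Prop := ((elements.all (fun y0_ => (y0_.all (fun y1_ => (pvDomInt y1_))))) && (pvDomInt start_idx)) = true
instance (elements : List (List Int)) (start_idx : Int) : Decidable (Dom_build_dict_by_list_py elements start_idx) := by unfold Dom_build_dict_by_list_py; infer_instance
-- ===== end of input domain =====

-- B replaces A's seen-dict scan (dict + counter threaded through one loop) by a worklist algorithm: take the first remaining tuple, index it by the dict's current size, filter out its duplicates, repeat; objective: alternative.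


-- ===== PORT A =====
-- A's loop body: if tup not in dic: dic[tup] = idx; idx += 1
def bdStep (st : PySem.Dict (List Int) Int × Int) (ele : List Int) : PySem.Dict (List Int) Int × Int :=
  if st.1.contains ele then st else (st.1.insert ele st.2, st.2 + 1)

def build_dict_by_list_py (elements : List (List Int)) (start_idx : Int) : List (List Int × Int) :=
  (elements.foldl bdStep (PySem.Dict.empty, start_idx)).1.items

-- ===== PORT B =====
-- B's while loop: head = rest[0]; dic[head] = start_idx + len(dic); rest = [t for t in rest[1:] if t != head]
def bdAltLoop (rest : List (List Int)) (dic : PySem.Dict (List Int) Int) (start_idx : Int) : PySem.Dict (List Int) Int :=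
  match rest with
  | [] => dic
  | head :: tl =>
      bdAltLoop (tl.filter (fun t => t != head)) (dic.insert head (start_idx + dic.size)) start_idx
termination_by rest.length
decreasing_by
  simp only [List.length_unattach]
  exact Nat.lt_succ_of_le (le_trans (List.length_filter_le _ _) (by simp))

def build_dict_by_list_py_alt (elements : List (List Int)) (start_idx : Int) : List (List Int × Int) :=
  (bdAltLoop elements PySem.Dict.empty start_idx).items

-- ===== PRECONDITION & SPEC =====
def Spec_build_dict_by_list_py (elements : List (List Int)) (start_idx : Int) (out : List (List Int × Int)) : Prop := out = build_dict_by_list_py_alt elements start_idx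
instance (elements : List (List Int)) (start_idx : Int) (out : List (List Int × Int)) : Decidable (Spec_build_dict_by_list_py elements start_idx out) := by unfold Spec_build_dict_by_list_py; infer_instance

-- ===== CLAIM (what is proved, stated in full; the proofs are below) =====
def Claim_equal_build_dict_by_list_py : Prop := ∀ (elements : List (List Int)) (start_idx : Int), Dom_build_dict_by_list_py elements start_idx → Spec_build_dict_by_list_py elements start_idx (build_dict_by_list_py elements start_idx)

-- ===== LEMMAS AND PROOFS =====

-- once the dict contains h, every later occurrence of h is a no-op for A's fold,
-- so A's fold over es equals its fold over es with the h's filtered out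
lemma bd_skip (es : List (List Int)) : ∀ (st : PySem.Dict (List Int) Int × Int) (h : List Int),
    st.1.contains h = true →
    es.foldl bdStep st = (es.filter (fun t => t != h)).foldl bdStep st := by
  induction es with
  | nil => intro st h _; rfl
  | cons e es ih =>
    intro st h hc
    by_cases he : e = h
    · subst he
      have hst : bdStep st e = st := by
        simp [bdStep, hc]
      simp only [List.filter_cons, bne_self_eq_false, Bool.false_eq_true, if_false,
        List.foldl_cons, hst]
      simpa using ih st e hc
    · have hne : (e != h) = true := by simp [he]
      simp only [List.filter_cons, hne, if_true, List.foldl_cons]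
      apply ih
      unfold bdStep
      split
      · exact hc
      · simpa [PySem.Dict.contains_insert] using Or.inr hc

-- main invariant: from a dict containing none of rest, A's fold (with its counter
-- at start_idx + dic.size) computes B's worklist loop
lemma bd_main : ∀ (n : Nat) (rest : List (List Int)) (dic : PySem.Dict (List Int) Int) (s : Int),
    rest.length ≤ n →
    (∀ e ∈ rest, dic.contains e = false) →
    (rest.foldl bdStep (dic, s + dic.size)).1 = bdAltLoop rest dic s := by
  intro n
  induction n with
  | zero =>
    intro rest dic s hlen _
    have : rest = [] := List.eq_nil_of_length_eq_zero (Nat.le_zero.mp hlen)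
    subst this
    simp [bdAltLoop]
  | succ n ih =>
    intro rest dic s hlen hfresh
    match rest with
    | [] => simp [bdAltLoop]
    | head :: tl =>
      have hc : dic.contains head = false := hfresh head (List.mem_cons_self ..)
      have hstep : bdStep (dic, s + dic.size) head
          = (dic.insert head (s + dic.size), s + dic.size + 1) := by
        simp [bdStep, hc]
      have hc' : (dic.insert head (s + dic.size)).contains head = true :=
        PySem.Dict.contains_insert_self ..
      have hsize : ((dic.insert head (s + dic.size)).size : Int) = dic.size + 1 := by
        have := PySem.Dict.size_insert dic head (s + dic.size)
        rw [this, hc]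
        push_cast
        ring
      rw [List.foldl_cons, hstep, bd_skip tl _ head hc']
      have harith : s + (dic.size : Int) + 1
          = s + ((dic.insert head (s + dic.size)).size : Int) := by
        rw [hsize]; ring
      rw [harith]
      rw [ih (tl.filter (fun t => t != head)) (dic.insert head (s + dic.size)) s
        (by
          have := List.length_filter_le (fun t => t != head) tl
          simp only [List.length_cons] at hlen
          omega)
        (by
          intro e hm
          rw [List.mem_filter] at hm
          obtain ⟨hmem, hne⟩ := hm
          have : dic.contains e = false := hfresh e (List.mem_cons_of_mem _ hmem)
          rw [PySem.Dict.contains_insert]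
          simp only [this, Bool.or_false]
          simpa using hne)]
      conv_rhs => rw [bdAltLoop]

-- ===== VERDICT (by name: the statement is the Claim_ definition above) =====
theorem build_dict_by_list_py_spec : Claim_equal_build_dict_by_list_py := by
  unfold Claim_equal_build_dict_by_list_py
  intro elements start_idx _
  unfold Spec_build_dict_by_list_py build_dict_by_list_py build_dict_by_list_py_alt
  have h := bd_main elements.length elements PySem.Dict.empty start_idx (Nat.le_refl _)
    (by intro e _; exact PySem.Dict.contains_empty ..)
  simp only [PySem.Dict.size_empty, Int.natCast_zero, add_zero] at h
  rw [h]
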